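-- pv_equiv track=rewrite | github.com/MathieuDavidd/verimag---aftr | functions.py | list_gate_comb
-- ===== SOURCE A (Python) =====
-- def list_gate_comb(list, k):
--     lgc = []
--     i = 0
--     i_max = 2**len(list)-1
--
--     while i <= i_max:
--         tmp_list = []
--         j = 0
--         j_max = len(list)-1
--
--         while j <= j_max:
--             if (i >> j) & 1 == 1:
--                 tmp_list.append(list[j])
--
--             j += 1
--
--         if len(tmp_list) == k:
--             lgc.append(tmp_list)
--
--         i += 1
--
--     return lgc
-- ===== SOURCE B (Python) =====
-- def list_gate_comb(list, k):
--     # Recursive combinations in the same (colex / increasing-bitmask) order: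
--     # subsets not using the last element first, then those that append it.
--     def comb(xs, m):
--         if m < 0:
--             return []
--         if m == 0:
--             return [[]]
--         if len(xs) < m:
--             return []
--         init = xs[:-1]
--         return comb(init, m) + [s + [xs[-1]] for s in comb(init, m - 1)]
--     return comb(list, k)
-- ===== Notes on version B (the rewrite author's own statement) =====
-- stated objective: faster
-- what changed: Replaces the scan of all 2^n bitmasks (rebuilding each subset bit by bit) with a right-recursive combinations construction that emits size-k subsets directly in the same colex (increasing-bitmask) order; intended as asymptotically faster (O(C(n,k)) vs O(2^n) masks), measured ~50-700x at the largest size where both programs finished (n=16); at larger n the output itself is too large for either to finish.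
import Mathlib
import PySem

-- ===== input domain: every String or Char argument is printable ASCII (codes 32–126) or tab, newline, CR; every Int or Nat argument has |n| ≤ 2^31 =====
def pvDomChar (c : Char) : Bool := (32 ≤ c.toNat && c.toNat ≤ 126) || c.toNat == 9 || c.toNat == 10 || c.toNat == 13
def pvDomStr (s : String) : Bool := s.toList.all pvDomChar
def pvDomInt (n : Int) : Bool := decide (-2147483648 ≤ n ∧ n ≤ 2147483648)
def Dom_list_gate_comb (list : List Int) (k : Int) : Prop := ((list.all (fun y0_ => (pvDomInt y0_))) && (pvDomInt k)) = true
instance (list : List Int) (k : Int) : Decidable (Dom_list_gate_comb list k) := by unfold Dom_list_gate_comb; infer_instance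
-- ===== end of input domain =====

-- B enumerates the size-k subsets directly by recursion on the last element (same colex order as A's
-- full bitmask scan), instead of testing every one of the 2^n masks; intended as faster (measured
-- ~50-700x at the largest size where both programs finished, n=16).

-- ===== PORT A =====
-- inner while loop: j counts 0..len-1; `(i >> j) & 1` is ported as (i // 2**j) % 2, which is
-- exactly Python's value for every int i and j ≥ 0; `list[j]` is ported with pyGetD (j is always
-- in range 0 ≤ j < len here, where pyGetD equals Python's list[j]).
def lgcInner (list : List Int) (i : Int) (j : Int) (tmp : List Int) : List Int :=
  if j ≤ (list.length : Int) - 1 then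
    lgcInner list i (j + 1)
      (if PySem.Int.mod (PySem.Int.floordiv i (2 ^ j.toNat)) 2 = 1
       then tmp ++ [PySem.List.pyGetD list j 0] else tmp)
  else tmp
termination_by ((list.length : Int) - j).toNat
decreasing_by omega

-- outer while loop: i counts 0..2^len-1
def lgcOuter (list : List Int) (k : Int) (iMax : Int) (i : Int) (lgc : List (List Int)) : List (List Int) :=
  if i ≤ iMax then
    lgcOuter list k iMax (i + 1)
      (if ((lgcInner list i 0 []).length : Int) = k then lgc ++ [lgcInner list i 0 []] else lgc)
  else lgc
termination_by (iMax + 1 - i).toNat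
decreasing_by omega

def list_gate_comb (list : List Int) (k : Int) : List (List Int) :=
  lgcOuter list k (2 ^ list.length - 1) 0 []

-- ===== PORT B =====
-- comb(xs, m) of Source B; xs[:-1] is dropLast, xs[-1] is getLastD (xs is nonempty on that branch,
-- where both are exactly Python's values).
def combAlt (xs : List Int) (m : Int) : List (List Int) :=
  if m < 0 then []
  else if m = 0 then [[]]
  else if (xs.length : Int) < m then []
  else combAlt xs.dropLast m ++ (combAlt xs.dropLast (m - 1)).map (fun s => s ++ [xs.getLastD 0])
termination_by xs.length
decreasing_by
  all_goals
    rename_i h1 h2 h3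
    have hne : xs.length ≠ 0 := by intro h0; rw [h0] at h3; simp at h3; omega
    simp [List.length_dropLast]; omega

def list_gate_comb_alt (list : List Int) (k : Int) : List (List Int) :=
  combAlt list k

-- ===== PRECONDITION & SPEC =====
def Spec_list_gate_comb (list : List Int) (k : Int) (out : List (List Int)) : Prop := out = list_gate_comb_alt list k
instance (list : List Int) (k : Int) (out : List (List Int)) : Decidable (Spec_list_gate_comb list k out) := by unfold Spec_list_gate_comb; infer_instance

-- ===== CLAIM (what is proved, stated in full; the proofs are below) =====
def Claim_equal_list_gate_comb : Prop := ∀ (list : List Int) (k : Int), Dom_list_gate_comb list k → Spec_list_gate_comb list k (list_gate_comb list k)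

-- ===== LEMMAS AND PROOFS =====

-- the subset selected by mask i (low bit = first element)
def pvSelect : Int → List Int → List Int
  | _, [] => []
  | i, x :: xs =>
      (if PySem.Int.mod i 2 = 1 then [x] else []) ++ pvSelect (PySem.Int.floordiv i 2) xs

def pvMask (xs : List Int) (k : Int) (i : Int) : Option (List Int) :=
  if ((pvSelect i xs).length : Int) = k then some (pvSelect i xs) else none

def pvF (xs : List Int) (k : Int) : List (List Int) :=
  (PySem.List.pyRange 0 (2 ^ xs.length) 1).filterMap (pvMask xs k)


lemma pv_inner_eq (list : List Int) (i : Int) :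
    ∀ (d : ℕ) (j : Int) (tmp : List Int), 0 ≤ i → 0 ≤ j → d = list.length - j.toNat →
      lgcInner list i j tmp
        = tmp ++ pvSelect (PySem.Int.floordiv i (2 ^ j.toNat)) (list.drop j.toNat) := by
  intro d
  induction d with
  | zero =>
    intro j tmp hi hj hd
    have hge : list.length ≤ j.toNat := by omega
    rw [lgcInner, if_neg (by omega), List.drop_eq_nil_of_le hge]
    simp [pvSelect]
  | succ d ih =>
    intro j tmp hi hj hd
    have hjlt : j.toNat < list.length := by omega
    rw [lgcInner, if_pos (by omega)]
    rw [ih (j + 1) _ hi (by omega) (by omega)]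
    have h1 : (j + 1).toNat = j.toNat + 1 := by omega
    rw [h1, List.drop_eq_getElem_cons hjlt]
    have hget : PySem.List.pyGetD list j 0 = list[j.toNat] := by
      rw [PySem.List.pyGetD_of_nonneg list 0 hj, List.getD_eq_getElem list 0 hjlt]
    have hdiv : PySem.Int.floordiv (PySem.Int.floordiv i (2 ^ j.toNat)) 2
        = PySem.Int.floordiv i (2 ^ (j.toNat + 1)) := by
      rw [PySem.Int.floordiv_eq_ediv_of_pos (by positivity),
          PySem.Int.floordiv_eq_ediv_of_pos (by norm_num),
          PySem.Int.floordiv_eq_ediv_of_pos (by positivity),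
          Int.ediv_ediv_of_nonneg (by positivity), pow_succ]
    simp only [pvSelect, hget, hdiv]
    split <;> simp

lemma pv_inner_zero (list : List Int) (i : Int) (hi : 0 ≤ i) :
    lgcInner list i 0 [] = pvSelect i list := by
  rw [pv_inner_eq list i list.length 0 [] hi le_rfl (by simp)]
  simp

lemma pv_outer_eq (list : List Int) (k iMax : Int) :
    ∀ (d : ℕ) (i : Int) (lgc : List (List Int)), 0 ≤ i → d = (iMax + 1 - i).toNat →
      lgcOuter list k iMax i lgc
        = lgc ++ (PySem.List.pyRange i (iMax + 1) 1).filterMap (pvMask list k) := by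
  intro d
  induction d with
  | zero =>
    intro i lgc hi hd
    rw [lgcOuter, if_neg (by omega), PySem.List.pyRange_one_eq_nil (by omega)]
    simp
  | succ d ih =>
    intro i lgc hi hd
    rw [lgcOuter, if_pos (by omega)]
    rw [ih (i + 1) _ (by omega) (by omega)]
    have hr : PySem.List.pyRange i (iMax + 1) 1
        = i :: PySem.List.pyRange (i + 1) (iMax + 1) 1 :=
      PySem.List.pyRange_one_cons (by omega)
    rw [hr, List.filterMap_cons, pv_inner_zero list i hi]
    by_cases hc : ((pvSelect i list).length : Int) = k
    · simp [pvMask, hc]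
    · simp [pvMask, hc]

lemma pv_A_eq (list : List Int) (k : Int) : list_gate_comb list k = pvF list k := by
  unfold list_gate_comb pvF
  rw [pv_outer_eq list k (2 ^ list.length - 1) (((2:Int) ^ list.length - 1 + 1 - 0)).toNat 0 []
      le_rfl rfl]
  have h : (2 : Int) ^ list.length - 1 + 1 = 2 ^ list.length := by ring
  rw [h, List.nil_append]

lemma pv_sel_append_low (xs : List Int) :
    ∀ (x i : Int), 0 ≤ i → i < 2 ^ xs.length → pvSelect i (xs ++ [x]) = pvSelect i xs := by
  induction xs with
  | nil =>
    intro x i h0 h1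
    have : i = 0 := by simp at h1; omega
    subst this
    simp [pvSelect]
  | cons y ys ih =>
    intro x i h0 h1
    simp only [List.cons_append, pvSelect]
    congr 1
    have h2 : (0:Int) < 2 := by norm_num
    rw [PySem.Int.floordiv_eq_ediv_of_pos h2]
    apply ih
    · exact Int.ediv_nonneg h0 (by norm_num)
    · rw [Int.ediv_lt_iff_lt_mul h2]
      have : ((y :: ys).length : ℕ) = ys.length + 1 := by simp
      calc i < 2 ^ (y :: ys).length := h1
        _ = 2 ^ ys.length * 2 := by rw [this, pow_succ]

lemma pv_sel_append_high (xs : List Int) :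
    ∀ (x r : Int), 0 ≤ r → r < 2 ^ xs.length →
      pvSelect (2 ^ xs.length + r) (xs ++ [x]) = pvSelect r xs ++ [x] := by
  induction xs with
  | nil =>
    intro x r h0 h1
    have : r = 0 := by simp at h1; omega
    subst this
    simp [pvSelect]
  | cons y ys ih =>
    intro x r h0 h1
    have hlen : ((y :: ys).length : ℕ) = ys.length + 1 := by simp
    have hsplit : (2:Int) ^ (y :: ys).length + r = r + 2 * 2 ^ ys.length := by
      rw [hlen, pow_succ]; ring
    simp only [List.cons_append, pvSelect, hsplit]
    have hmod : PySem.Int.mod (r + 2 * 2 ^ ys.length) 2 = PySem.Int.mod r 2 := by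
      rw [PySem.Int.mod_eq_emod_of_pos (by norm_num),
          PySem.Int.mod_eq_emod_of_pos (by norm_num),
          Int.add_mul_emod_self_left]
    have hdiv : PySem.Int.floordiv (r + 2 * 2 ^ ys.length) 2
        = 2 ^ ys.length + PySem.Int.floordiv r 2 := by
      rw [PySem.Int.floordiv_eq_ediv_of_pos (by norm_num),
          PySem.Int.floordiv_eq_ediv_of_pos (by norm_num),
          Int.add_mul_ediv_left _ _ (by norm_num : (2:Int) ≠ 0)]
      ring
    rw [hmod, hdiv]
    have h2 : (0:Int) < 2 := by norm_num
    rw [ih x (PySem.Int.floordiv r 2)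
        (by rw [PySem.Int.floordiv_eq_ediv_of_pos h2]; exact Int.ediv_nonneg h0 (by norm_num))
        (by rw [PySem.Int.floordiv_eq_ediv_of_pos h2, Int.ediv_lt_iff_lt_mul h2]
            calc r < 2 ^ (y :: ys).length := h1
              _ = 2 ^ ys.length * 2 := by rw [hlen, pow_succ])]
    split <;> simp

lemma pv_F_concat (xs : List Int) (x k : Int) :
    pvF (xs ++ [x]) k = pvF xs k ++ (pvF xs (k - 1)).map (fun s => s ++ [x]) := by
  unfold pvF
  have hlen : (xs ++ [x]).length = xs.length + 1 := by simp
  have h2 : (2 : Int) ^ (xs.length + 1) = 2 ^ xs.length + 2 ^ xs.length := by ring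
  have hpos : (0:Int) ≤ 2 ^ xs.length := by positivity
  rw [hlen, h2,
      PySem.List.pyRange_one_append 0 (2 ^ xs.length) (2 ^ xs.length + 2 ^ xs.length)
        hpos (by linarith),
      List.filterMap_append]
  congr 1
  · apply List.filterMap_congr
    intro i hi
    rw [PySem.List.mem_pyRange_one] at hi
    unfold pvMask
    rw [pv_sel_append_low xs x i hi.1 hi.2]
  · have hshift : PySem.List.pyRange (2 ^ xs.length) (2 ^ xs.length + 2 ^ xs.length) 1
        = (PySem.List.pyRange 0 (2 ^ xs.length) 1).map (fun r => 2 ^ xs.length + r) := by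
      rw [PySem.List.pyRange_one, PySem.List.pyRange_one, List.map_map]
      have : ((2:Int) ^ xs.length + 2 ^ xs.length - 2 ^ xs.length).toNat
          = ((2:Int) ^ xs.length - 0).toNat := by omega
      rw [this]
      simp [Function.comp]
    rw [hshift, List.filterMap_map, List.map_filterMap]
    apply List.filterMap_congr
    intro r hr
    rw [PySem.List.mem_pyRange_one] at hr
    show pvMask (xs ++ [x]) k (2 ^ xs.length + r) = Option.map (fun s => s ++ [x]) (pvMask xs (k - 1) r)
    unfold pvMask
    rw [pv_sel_append_high xs x r hr.1 hr.2]
    by_cases h : ((pvSelect r xs).length : Int) = k - 1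
    · rw [if_pos (by simp; omega), if_pos h]
      simp
    · rw [if_neg (by simp; omega), if_neg h]
      simp

lemma pv_comb_neg (xs : List Int) (k : Int) (hk : k < 0) : combAlt xs k = [] := by
  rw [combAlt, if_pos hk]

lemma pv_comb_concat (xs : List Int) (x k : Int) :
    combAlt (xs ++ [x]) k = combAlt xs k ++ (combAlt xs (k - 1)).map (fun s => s ++ [x]) := by
  by_cases h0 : k < 0
  · rw [pv_comb_neg _ _ h0, pv_comb_neg _ _ h0, pv_comb_neg _ _ (by omega)]
    simp
  by_cases h1 : k = 0
  · subst h1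
    rw [combAlt, if_neg h0, if_pos rfl, combAlt, if_neg h0, if_pos rfl,
        pv_comb_neg _ _ (by norm_num)]
    simp
  have hlen : ((xs ++ [x]).length : Int) = (xs.length : Int) + 1 := by simp
  by_cases h2 : ((xs ++ [x]).length : Int) < k
  · rw [combAlt, if_neg h0, if_neg h1, if_pos h2]
    rw [combAlt, if_neg h0, if_neg h1, if_pos (by omega)]
    rw [combAlt, if_neg (by omega), if_neg (by omega), if_pos (by omega)]
    simp
  · rw [combAlt, if_neg h0, if_neg h1, if_neg h2, List.dropLast_concat,
        List.getLastD_concat]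

lemma pv_comb_eq (xs : List Int) : ∀ k, combAlt xs k = pvF xs k := by
  induction xs using List.reverseRecOn with
  | nil =>
    intro k
    unfold pvF
    have h1 : (2 : Int) ^ ([] : List Int).length = 0 + 1 := by simp
    rw [h1, PySem.List.pyRange_one_singleton, List.filterMap_cons, List.filterMap_nil]
    by_cases h0 : k < 0
    · rw [pv_comb_neg _ _ h0]
      unfold pvMask
      rw [if_neg (by simp [pvSelect]; omega)]
    by_cases h1 : k = 0
    · subst h1
      rw [combAlt, if_neg h0, if_pos rfl]
      unfold pvMask
      rw [if_pos (by simp [pvSelect])]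
      simp [pvSelect]
    · rw [combAlt, if_neg h0, if_neg h1, if_pos (by simp; omega)]
      unfold pvMask
      rw [if_neg (by simp [pvSelect]; omega)]
  | append_singleton ys y ih =>
    intro k
    rw [pv_comb_concat, pv_F_concat, ih, ih]

-- ===== VERDICT (by name: the statement is the Claim_ definition above) =====
theorem list_gate_comb_spec : Claim_equal_list_gate_comb := by
  intro list k _
  unfold Spec_list_gate_comb list_gate_comb_alt
  rw [pv_A_eq, pv_comb_eq]
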